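-- pv_equiv track=rewrite | github.com/manubellido/WR | apps/googlemaps_localities/models-copy-01.py | filter_components_below
-- ===== SOURCE A (Python) =====
-- def filter_components_below(components, component_type='locality'):
--     results = []
--
--     type_found = False
--     for c in components:
--         if not type_found:
--             if component_type in c['types']:
--                 type_found = True
--             else:
--                 continue
--         results.append(c)
--
--     return results
-- ===== SOURCE B (Python) =====
-- def filter_components_below(components, component_type='locality'):
--     for i, c in enumerate(components):
--         if component_type in c['types']:
--             return components[i:]
--     return []
-- ===== Notes on version B (the rewrite author's own statement) =====
-- stated objective: simpler
-- what changed: Replaces the flag-driven accumulate loop with find-first-index + slice components[i:], returning an empty result when no component matches.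
import Mathlib
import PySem

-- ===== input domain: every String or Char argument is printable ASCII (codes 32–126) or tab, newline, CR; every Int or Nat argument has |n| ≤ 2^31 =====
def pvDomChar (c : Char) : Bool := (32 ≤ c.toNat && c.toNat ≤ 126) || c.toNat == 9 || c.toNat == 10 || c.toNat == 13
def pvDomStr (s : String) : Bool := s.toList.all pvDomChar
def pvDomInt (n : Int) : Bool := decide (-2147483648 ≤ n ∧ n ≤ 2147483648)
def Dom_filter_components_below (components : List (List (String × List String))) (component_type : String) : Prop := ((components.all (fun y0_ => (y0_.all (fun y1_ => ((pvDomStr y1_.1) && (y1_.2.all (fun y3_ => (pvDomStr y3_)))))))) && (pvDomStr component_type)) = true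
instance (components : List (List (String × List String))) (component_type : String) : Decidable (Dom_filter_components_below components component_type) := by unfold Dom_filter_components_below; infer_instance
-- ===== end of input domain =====

-- B replaces A's flag-driven accumulate loop with find-first-matching-index + slice
-- components[i:] (an empty result when none matches); equivalence is about the return value only.

-- ===== PORT A =====
-- component_type in c['types']; total form via getD [], exact wherever Python does not raise
-- (Pre_ below excludes exactly the KeyError inputs).
def fcbMember (component_type : String) (c : List (String × List String)) : Bool :=
  ((PySem.Dict.mk c).getD "types" []).contains component_type

def fcbStep (component_type : String)
    (acc : List (List (String × List String)) × Bool)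
    (c : List (String × List String)) : List (List (String × List String)) × Bool :=
  let (results, type_found) := acc
  if !type_found then
    if fcbMember component_type c then (results ++ [c], true)
    else (results, type_found)
  else (results ++ [c], type_found)

def filter_components_below (components : List (List (String × List String))) (component_type : String) : List (List (String × List String)) :=
  (components.foldl (fcbStep component_type) ([], false)).1

-- ===== PORT B =====
-- for i, c in enumerate(components): if match: return components[i:] — find the index, then slice.
def fcbFind (component_type : String) : List (List (String × List String)) → Nat → Option Nat
  | [], _ => none
  | c :: rest, i =>
      if fcbMember component_type c then some i else fcbFind component_type rest (i + 1)

def filter_components_below_alt (components : List (List (String × List String))) (component_type : String) : List (List (String × List String)) :=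
  match fcbFind component_type components 0 with
  | some i => PySem.List.slice components (some (i : Int)) none   -- components[i:]
  | none => []

-- ===== PRECONDITION & SPEC =====
-- Python's scan looks up c['types'] only until the first component whose 'types' contains
-- component_type; Pre_ excludes exactly the inputs where that scan hits a component without a
-- 'types' key, on which both A and B raise KeyError.
def fcbCont (component_type : String) (c : List (String × List String)) : Bool :=
  match (PySem.Dict.mk c).get? "types" with
  | some ts => !ts.contains component_type
  | none => false

def Pre_filter_components_below (components : List (List (String × List String))) (component_type : String) : Prop :=
  ((components.dropWhile (fcbCont component_type)).head?.all
    (fun c => ((PySem.Dict.mk c).get? "types").isSome)) = true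

instance (components : List (List (String × List String))) (component_type : String) : Decidable (Pre_filter_components_below components component_type) := by unfold Pre_filter_components_below; infer_instance

def pvWitness_filter_components_below : (List (List (String × List String))) × String :=
  ([[("types", ["country"])], [("types", ["locality"])], [("name", ["x"])]], "locality")

def Spec_filter_components_below (components : List (List (String × List String))) (component_type : String) (out : List (List (String × List String))) : Prop := out = filter_components_below_alt components component_type
instance (components : List (List (String × List String))) (component_type : String) (out : List (List (String × List String))) : Decidable (Spec_filter_components_below components component_type out) := by unfold Spec_filter_components_below; infer_instance

-- ===== CLAIM (what is proved, stated in full; the proofs are below) =====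
def Claim_equal_filter_components_below : Prop := ∀ (components : List (List (String × List String))) (component_type : String), Dom_filter_components_below components component_type → Pre_filter_components_below components component_type → Spec_filter_components_below components component_type (filter_components_below components component_type)

-- ===== LEMMAS AND PROOFS =====

-- Once the flag is set, A's fold appends every remaining component.
theorem fcbStep_found (t : String) (l : List (List (String × List String)))
    (acc : List (List (String × List String))) :
    l.foldl (fcbStep t) (acc, true) = (acc ++ l, true) := by
  induction l generalizing acc with
  | nil => simp
  | cons c rest ih =>
      simp [List.foldl, fcbStep, ih]

-- A computes dropWhile (not member).
theorem portA_eq_dropWhile (t : String) (l : List (List (String × List String))) :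
    filter_components_below l t = l.dropWhile (fun c => !fcbMember t c) := by
  induction l with
  | nil => rfl
  | cons c rest ih =>
      by_cases h : fcbMember t c
      · simp [filter_components_below, List.foldl, fcbStep, h, fcbStep_found, List.dropWhile]
      · simpa [filter_components_below, List.foldl, fcbStep, h, List.dropWhile] using ih

theorem fcbFind_shift (t : String) (l : List (List (String × List String))) (i : Nat) :
    fcbFind t l (i + 1) = (fcbFind t l i).map (· + 1) := by
  induction l generalizing i with
  | nil => rfl
  | cons c rest ih =>
      by_cases h : fcbMember t c
      · simp [fcbFind, h]
      · simp [fcbFind, h, ih]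

-- B computes dropWhile (not member) too.
theorem portB_eq_dropWhile (t : String) (l : List (List (String × List String))) :
    filter_components_below_alt l t = l.dropWhile (fun c => !fcbMember t c) := by
  induction l with
  | nil => rfl
  | cons c rest ih =>
      by_cases h : fcbMember t c
      · simp [filter_components_below_alt, fcbFind, h, List.dropWhile,
          PySem.List.slice_zero_start, PySem.List.slice_none_none]
      · have hbranch : fcbFind t (c :: rest) 0 = (fcbFind t rest 0).map (· + 1) := by
          rw [show fcbFind t (c :: rest) 0 = if fcbMember t c then some 0 else fcbFind t rest 1 from rfl]
          rw [if_neg h, fcbFind_shift]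
        rw [List.dropWhile_cons_of_pos (by simp [h]), ← ih]
        unfold filter_components_below_alt
        rw [hbranch]
        cases hfind : fcbFind t rest 0 with
        | none => simp
        | some j =>
            simp only [Option.map_some]
            rw [PySem.List.slice_from_natCast, PySem.List.slice_from_natCast,
              List.drop_succ_cons]

-- ===== VERDICT (by name: the statement is the Claim_ definition above) =====
theorem filter_components_below_spec : Claim_equal_filter_components_below := by
  intro components component_type _ _
  unfold Spec_filter_components_below
  rw [portA_eq_dropWhile, portB_eq_dropWhile]
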